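-- pv_equiv track=rewrite | github.com/JuBoks/Coding-Test | 구현/PGM_자물쇠와열쇠.py | is_solution
-- ===== SOURCE A (Python) =====
-- def is_solution(key, lock_extended, lock_dim):
--     # add key matrix on lock matrix
--     key_dim = len(key[0])
--     lock_extended_dim = len(lock_extended[0])
--     upto = lock_extended_dim - key_dim + 1
--     for start_y in range(upto):
--         for start_x in range(upto):
--             # add matrix
--             if add_matrix(key, lock_extended, start_y, start_x, lock_dim):
--                 return True
--     return False
--
-- def add_matrix(key, lock, start_y, start_x, lock_dim):
--     key_dim = len(key[0])
--     # sum matrix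
--     for y in range(key_dim):
--         for x in range(key_dim):
--             lock[start_y + y][start_x + x] += key[y][x]
--
--     # check matrix
--     lock_start_x = key_dim - 1
--     lock_start_y = key_dim - 1
--     for y in range(lock_dim):
--         for x in range(lock_dim):
--             if lock[lock_start_y + y][lock_start_x + x] != 1:
--                 # lock 원상복구
--                 # deepcopy시 너무 많은 시간이 소요됨
--                 for y2 in range(key_dim):
--                     for x2 in range(key_dim):
--                         lock[start_y + y2][start_x + x2] -= key[y2][x2]
--                 return False
--     return True
-- ===== SOURCE B (Python) =====
-- def is_solution(key, lock_extended, lock_dim):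
--     # Pure sliding-window check: no mutation, no add/revert loops.
--     k = len(key[0])
--     n = len(lock_extended[0])
--     base = k - 1
--     return any(
--         all(
--             lock_extended[base + y][base + x]
--             + (key[base + y - sy][base + x - sx]
--                if 0 <= base + y - sy < k and 0 <= base + x - sx < k
--                else 0)
--             == 1
--             for y in range(lock_dim) for x in range(lock_dim)
--         )
--         for sy in range(n - k + 1) for sx in range(n - k + 1)
--     )
-- ===== Notes on version B (the rewrite author's own statement) =====
-- stated objective: simpler
-- what changed: A mutates the lock in place per shift (add the key, scan the window, subtract the key back on failure); B is a pure sliding-window check that computes each checked cell as lock value plus the key's overlap contribution, so the add and revert sweeps and all mutation disappear.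
-- outside the precondition, e.g. on is_solution([[]], [[1, 1], [1, 1]], 1): A returns True, B returns True; on is_solution([[0, 0], [0, 0]], [[1, 1], [1, 1, 1], [0, 1, 1]], 2): A returns True, B returns True
import Mathlib
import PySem

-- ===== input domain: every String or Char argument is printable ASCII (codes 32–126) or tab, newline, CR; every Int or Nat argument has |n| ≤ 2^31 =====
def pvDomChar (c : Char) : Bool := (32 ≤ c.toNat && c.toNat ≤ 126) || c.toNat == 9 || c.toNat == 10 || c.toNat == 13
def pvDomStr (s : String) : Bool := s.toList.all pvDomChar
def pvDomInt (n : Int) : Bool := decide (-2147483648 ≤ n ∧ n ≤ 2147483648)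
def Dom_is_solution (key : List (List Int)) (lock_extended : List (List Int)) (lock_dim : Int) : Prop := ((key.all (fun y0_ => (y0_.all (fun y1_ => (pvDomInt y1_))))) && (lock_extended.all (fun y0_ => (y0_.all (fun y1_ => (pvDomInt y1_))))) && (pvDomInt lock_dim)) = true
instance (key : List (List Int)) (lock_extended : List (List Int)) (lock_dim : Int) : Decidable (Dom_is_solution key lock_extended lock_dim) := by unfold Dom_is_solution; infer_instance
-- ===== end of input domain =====

-- B replaces A's mutate/check/restore sweeps by a pure sliding-window check (simpler; no add/revert loops).
-- NOTE on side effects: Python A mutates lock_extended in place (on success the key stays added); the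
-- equivalence proved here is about the RETURN value only.  B never mutates.

-- ===== PORT A =====
-- 2-D read/write helpers: m[i][j] and the in-place assignment m[i][j] = v.
-- Exact for the indices reached under Pre_is_solution (all nonnegative and in range);
-- Python's negative-index wraparound / IndexError cases are excluded by Pre_is_solution.
def pvGet2 (m : List (List Int)) (i j : Int) : Int :=
  (m.getD i.toNat []).getD j.toNat 0

def pvSet2 (m : List (List Int)) (i j v : Int) : List (List Int) :=
  m.set i.toNat ((m.getD i.toNat []).set j.toNat v)

-- A's '# sum matrix' loop and its '# lock 원상복구' restore loop are the SAME nested sweep,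
-- one with += and one with -=; the op g is the only difference, so the sweep is factored.
def pvSweep (g : Int → Int → Int) (key : List (List Int)) (L : List (List Int))
    (sy sx kY kX : Int) : List (List Int) :=
  (PySem.List.pyRange 0 kY 1).foldl (fun M y =>
    (PySem.List.pyRange 0 kX 1).foldl (fun M x =>
      pvSet2 M (sy + y) (sx + x) (g (pvGet2 M (sy + y) (sx + x)) (pvGet2 key y x))) M) L

-- the '# check matrix' double loop, as Python runs it: counters y, x with an early
-- exit at the first cell ≠ 1 (the 'return False')
def pvCheckRow (L : List (List Int)) (k lock_dim y x : Int) : Bool :=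
  if h : x < lock_dim then
    if pvGet2 L (k - 1 + y) (k - 1 + x) != 1 then true
    else pvCheckRow L k lock_dim y (x + 1)
  else false
termination_by (lock_dim - x).toNat
decreasing_by omega

def pvCheckFail (L : List (List Int)) (k lock_dim y : Int) : Bool :=
  if h : y < lock_dim then
    if pvCheckRow L k lock_dim y 0 then true
    else pvCheckFail L k lock_dim (y + 1)
  else false
termination_by (lock_dim - y).toNat
decreasing_by omega

-- add_matrix: mutation is threaded as an explicit state (Bool result, lock after the call)
def pvAddMatrix (key lock : List (List Int)) (start_y start_x lock_dim : Int) :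
    Bool × List (List Int) :=
  let key_dim : Int := (key.getD 0 []).length
  let L1 := pvSweep (fun a b => a + b) key lock start_y start_x key_dim key_dim
  if pvCheckFail L1 key_dim lock_dim 0 then
    (false, pvSweep (fun a b => a - b) key L1 start_y start_x key_dim key_dim)
  else (true, L1)

-- the nested 'for start_y: for start_x: if add_matrix(...): return True' with the lock threaded
def pvGoA (key : List (List Int)) (lock_dim : Int) :
    List (Int × Int) → List (List Int) → Bool
  | [], _ => false
  | (sy, sx) :: rest, L =>
    let r := pvAddMatrix key L sy sx lock_dim
    if r.1 then true else pvGoA key lock_dim rest r.2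

def is_solution (key : List (List Int)) (lock_extended : List (List Int)) (lock_dim : Int) : Bool :=
  let key_dim : Int := (key.getD 0 []).length
  let lock_extended_dim : Int := (lock_extended.getD 0 []).length
  let upto := lock_extended_dim - key_dim + 1
  pvGoA key lock_dim
    ((PySem.List.pyRange 0 upto 1).flatMap (fun sy =>
      (PySem.List.pyRange 0 upto 1).map (fun sx => (sy, sx))))
    lock_extended

-- ===== PORT B =====
-- Source B's 'all(... for y in range(lock_dim) for x in range(lock_dim))': the generator is an
-- early-exiting counter loop, ported as such (stops at the first cell that is not 1)
def pvAltRow (key lock : List (List Int)) (k base sy sx lock_dim y x : Int) : Bool :=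
  if h : x < lock_dim then
    (pvGet2 lock (base + y) (base + x) +
       (if 0 ≤ base + y - sy ∧ base + y - sy < k ∧ 0 ≤ base + x - sx ∧ base + x - sx < k
        then pvGet2 key (base + y - sy) (base + x - sx) else 0) == 1)
      && pvAltRow key lock k base sy sx lock_dim y (x + 1)
  else true
termination_by (lock_dim - x).toNat
decreasing_by omega

def pvAltAll (key lock : List (List Int)) (k base sy sx lock_dim y : Int) : Bool :=
  if h : y < lock_dim then
    pvAltRow key lock k base sy sx lock_dim y 0 && pvAltAll key lock k base sy sx lock_dim (y + 1)
  else true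
termination_by (lock_dim - y).toNat
decreasing_by omega

def is_solution_alt (key : List (List Int)) (lock_extended : List (List Int)) (lock_dim : Int) : Bool :=
  let k : Int := (key.getD 0 []).length
  let n : Int := (lock_extended.getD 0 []).length
  let base := k - 1
  (PySem.List.pyRange 0 (n - k + 1) 1).any (fun sy =>
    (PySem.List.pyRange 0 (n - k + 1) 1).any (fun sx =>
      pvAltAll key lock_extended k base sy sx lock_dim 0))

-- ===== PRECONDITION & SPEC =====
-- Pre_ excludes: (a) matrices too short/ragged in the rows the algorithm touches, on which A
-- raises IndexError; (b) keys whose first row is empty (k = 0) with a positive lock_dim, and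
-- oversized locks whose check window leaves the declared n×n square — there the index
-- expressions rely on Python's negative-index wraparound resp. on cells beyond the square, an
-- accident of representation on which A and B in fact still agree (see cites).
def Pre_is_solution (key : List (List Int)) (lock_extended : List (List Int)) (lock_dim : Int) : Prop :=
  key ≠ [] ∧ lock_extended ≠ [] ∧
  (key.getD 0 []).length ≤ key.length ∧
  (∀ r ∈ key.take (key.getD 0 []).length, (key.getD 0 []).length ≤ r.length) ∧
  (lock_extended.getD 0 []).length ≤ lock_extended.length ∧
  (∀ r ∈ lock_extended.take (lock_extended.getD 0 []).length,
    (lock_extended.getD 0 []).length ≤ r.length) ∧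
  (1 ≤ (key.getD 0 []).length ∨ lock_dim ≤ 0) ∧
  ((key.getD 0 []).length ≤ (lock_extended.getD 0 []).length →
    ((key.getD 0 []).length : Int) - 1 + lock_dim ≤ ((lock_extended.getD 0 []).length : Int))

instance (key : List (List Int)) (lock_extended : List (List Int)) (lock_dim : Int) :
    Decidable (Pre_is_solution key lock_extended lock_dim) := by
  unfold Pre_is_solution; infer_instance

def pvWitness_is_solution : List (List Int) × List (List Int) × Int :=
  ([[0]], [[0, 1], [1, 1]], 1)

def Spec_is_solution (key : List (List Int)) (lock_extended : List (List Int)) (lock_dim : Int) (out : Bool) : Prop := out = is_solution_alt key lock_extended lock_dim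
instance (key : List (List Int)) (lock_extended : List (List Int)) (lock_dim : Int) (out : Bool) : Decidable (Spec_is_solution key lock_extended lock_dim out) := by unfold Spec_is_solution; infer_instance

-- ===== CLAIM (what is proved, stated in full; the proofs are below) =====
def Claim_equal_is_solution : Prop := ∀ (key : List (List Int)) (lock_extended : List (List Int)) (lock_dim : Int), Dom_is_solution key lock_extended lock_dim → Pre_is_solution key lock_extended lock_dim → Spec_is_solution key lock_extended lock_dim (is_solution key lock_extended lock_dim)

-- ===== LEMMAS AND PROOFS =====

-- two matrices with the same row lengths
def pvShape (M N : List (List Int)) : Prop := M.map List.length = N.map List.length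

theorem pvShape_refl (M : List (List Int)) : pvShape M M := rfl

theorem pvShape_trans {M N P : List (List Int)} (h1 : pvShape M N) (h2 : pvShape N P) :
    pvShape M P := h1.trans h2

theorem pvShape_length {M N : List (List Int)} (h : pvShape M N) : M.length = N.length := by
  have := congrArg List.length h; simpa using this

theorem pvShape_row {M N : List (List Int)} (h : pvShape M N) (t : Nat) :
    (M.getD t []).length = (N.getD t []).length := by
  have hq : (M.map List.length)[t]? = (N.map List.length)[t]? := by rw [h]
  by_cases ht : t < M.length
  · have ht' : t < N.length := pvShape_length h ▸ ht
    rw [List.getD_eq_getElem _ _ ht, List.getD_eq_getElem _ _ ht']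
    rw [List.getElem?_map, List.getElem?_map] at hq
    rw [List.getElem?_eq_getElem ht, List.getElem?_eq_getElem ht'] at hq
    simpa using hq
  · have ht' : ¬ t < N.length := by rw [← pvShape_length h]; exact ht
    rw [List.getD_eq_default _ _ (by omega), List.getD_eq_default _ _ (by omega)]

theorem pvShape_set2 (L : List (List Int)) (i j v : Int) : pvShape (pvSet2 L i j v) L := by
  unfold pvShape pvSet2
  by_cases hi : i.toNat < L.length
  · rw [List.map_set, List.length_set, List.getD_eq_getElem _ _ hi]
    have : (L.map List.length)[i.toNat]'(by simpa using hi) = L[i.toNat].length := by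
      simp
    rw [← this, List.set_getElem_self]
  · rw [List.map_set]
    rw [List.set_eq_of_length_le (by simpa using Nat.le_of_not_lt hi)]

theorem pvShape_foldl {α : Type} (l : List α) (f : List (List Int) → α → List (List Int))
    (h : ∀ M a, pvShape (f M a) M) (L : List (List Int)) : pvShape (l.foldl f L) L := by
  induction l generalizing L with
  | nil => exact pvShape_refl L
  | cons a l ih => exact pvShape_trans (ih (f L a)) (h L a)

theorem pvGet2_set2 (L : List (List Int)) (a b v i j : Int)
    (ha : 0 ≤ a) (hb : 0 ≤ b) (hi : 0 ≤ i) (hj : 0 ≤ j)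
    (haL : a.toNat < L.length) (hbL : b.toNat < (L.getD a.toNat []).length) :
    pvGet2 (pvSet2 L a b v) i j = if i = a ∧ j = b then v else pvGet2 L i j := by
  unfold pvGet2 pvSet2
  by_cases hia : i = a
  · subst hia
    have h1 : (L.set i.toNat ((L.getD i.toNat []).set b.toNat v)).getD i.toNat [] =
        (L.getD i.toNat []).set b.toNat v := by
      rw [List.getD_eq_getElem _ _ (by simpa using haL)]
      exact List.getElem_set_self _
    rw [h1]
    by_cases hjb : j = b
    · subst hjb
      rw [List.getD_eq_getElem _ _ (by simpa using hbL)]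
      simp [List.getElem_set_self]
    · have hne : j.toNat ≠ b.toNat := fun hconv => hjb (by omega)
      rw [List.getD_eq_getElem?_getD, List.getElem?_set_ne (Ne.symm hne),
        ← List.getD_eq_getElem?_getD]
      simp [hjb]
  · have hne : a.toNat ≠ i.toNat := fun hconv => hia (by omega)
    rw [List.getD_eq_getElem?_getD (l := L.set _ _), List.getElem?_set_ne hne,
      ← List.getD_eq_getElem?_getD]
    simp [hia]

-- a full inner (x) sweep of row sy+y, pointwise
theorem pvRow_get (g : Int → Int → Int) (key L : List (List Int)) (sy sx y : Int) (K : Nat)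
    (i j : Int) (hy : 0 ≤ sy + y) (hsx : 0 ≤ sx) (hi : 0 ≤ i) (hj : 0 ≤ j)
    (hrow : (sy + y).toNat < L.length)
    (hcol : sx.toNat + K ≤ (L.getD (sy + y).toNat []).length) :
    pvGet2 ((PySem.List.pyRange 0 (K : Int) 1).foldl (fun M x =>
        pvSet2 M (sy + y) (sx + x) (g (pvGet2 M (sy + y) (sx + x)) (pvGet2 key y x))) L) i j
      = if i = sy + y ∧ sx ≤ j ∧ j < sx + K then g (pvGet2 L i j) (pvGet2 key y (j - sx))
        else pvGet2 L i j := by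
  induction K generalizing i j with
  | zero =>
    rw [show (((0:Nat)):Int) = 0 by simp, PySem.List.pyRange_one_eq_nil (le_refl 0)]
    simp only [List.foldl_nil]
    rw [if_neg (by omega)]
  | succ K ih =>
    have h0 : (((K+1:Nat)):Int) = ((K:Nat):Int) + 1 := by push_cast; ring
    rw [h0, PySem.List.pyRange_one_succ_right (by positivity), List.foldl_append]
    simp only [List.foldl_cons, List.foldl_nil]
    have hshape : pvShape ((PySem.List.pyRange 0 ((K:Nat):Int) 1).foldl (fun M x =>
        pvSet2 M (sy + y) (sx + x) (g (pvGet2 M (sy + y) (sx + x)) (pvGet2 key y x))) L) L :=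
      pvShape_foldl _ _ (fun M a => pvShape_set2 _ _ _ _) L
    have hcol' : sx.toNat + K ≤ (L.getD (sy + y).toNat []).length := by omega
    rw [pvGet2_set2 _ _ _ _ _ _ hy (by omega) hi hj
      (by rw [pvShape_length hshape]; exact hrow)
      (by rw [pvShape_row hshape]; omega)]
    rw [ih (sy + y) (sx + (K:Nat)) hy (by omega) hcol', ih i j hi hj hcol']
    by_cases hc : i = sy + y ∧ j = sx + (K:Nat)
    · rw [if_pos hc, if_neg (by omega), if_pos (by omega)]
      have : j - sx = ((K:Nat):Int) := by omega
      rw [this, hc.1, hc.2]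
    · rw [if_neg hc]
      by_cases hc2 : i = sy + y ∧ sx ≤ j ∧ j < sx + (K:Nat)
      · rw [if_pos hc2, if_pos (by omega)]
      · rw [if_neg hc2, if_neg (by omega)]

-- the full sweep, pointwise
theorem pvSweep_get (g : Int → Int → Int) (key L : List (List Int)) (sy sx : Int)
    (KY KX : Nat) (i j : Int) (hsy : 0 ≤ sy) (hsx : 0 ≤ sx) (hi : 0 ≤ i) (hj : 0 ≤ j)
    (hL : sy.toNat + KY ≤ L.length)
    (hrows : ∀ t, t < sy.toNat + KY → sx.toNat + KX ≤ (L.getD t []).length) :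
    pvGet2 (pvSweep g key L sy sx (KY : Int) (KX : Int)) i j
      = if sy ≤ i ∧ i < sy + KY ∧ sx ≤ j ∧ j < sx + KX
        then g (pvGet2 L i j) (pvGet2 key (i - sy) (j - sx)) else pvGet2 L i j := by
  unfold pvSweep
  induction KY generalizing i j with
  | zero =>
    rw [show (((0:Nat)):Int) = 0 by simp, PySem.List.pyRange_one_eq_nil (le_refl 0)]
    simp only [List.foldl_nil]
    rw [if_neg (by omega)]
  | succ KY ih =>
    have h0 : (((KY+1:Nat)):Int) = ((KY:Nat):Int) + 1 := by push_cast; ring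
    rw [h0, PySem.List.pyRange_one_succ_right (by positivity), List.foldl_append]
    simp only [List.foldl_cons, List.foldl_nil]
    have hshape : pvShape ((PySem.List.pyRange 0 ((KY:Nat):Int) 1).foldl (fun M y =>
        (PySem.List.pyRange 0 ((KX:Nat):Int) 1).foldl (fun M x =>
          pvSet2 M (sy + y) (sx + x) (g (pvGet2 M (sy + y) (sx + x)) (pvGet2 key y x))) M) L) L :=
      pvShape_foldl _ _ (fun M a => pvShape_foldl _ _ (fun M b => pvShape_set2 _ _ _ _) M) L
    have hrowF : (sy + ((KY:Nat):Int)).toNat <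
        ((PySem.List.pyRange 0 ((KY:Nat):Int) 1).foldl (fun M y =>
          (PySem.List.pyRange 0 ((KX:Nat):Int) 1).foldl (fun M x =>
            pvSet2 M (sy + y) (sx + x) (g (pvGet2 M (sy + y) (sx + x)) (pvGet2 key y x))) M) L).length := by
      rw [pvShape_length hshape]; omega
    have hcolF : sx.toNat + KX ≤
        (((PySem.List.pyRange 0 ((KY:Nat):Int) 1).foldl (fun M y =>
          (PySem.List.pyRange 0 ((KX:Nat):Int) 1).foldl (fun M x =>
            pvSet2 M (sy + y) (sx + x) (g (pvGet2 M (sy + y) (sx + x)) (pvGet2 key y x))) M) L).getD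
            (sy + ((KY:Nat):Int)).toNat []).length := by
      rw [pvShape_row hshape]; exact hrows _ (by omega)
    rw [pvRow_get g key _ sy sx ((KY:Nat):Int) KX i j (by omega) hsx hi hj hrowF hcolF]
    by_cases hc : i = sy + ((KY:Nat):Int) ∧ sx ≤ j ∧ j < sx + (KX:Nat)
    · rw [if_pos hc, ih i j hi hj (by omega) (fun t ht => hrows t (by omega)), if_neg (by omega), if_pos (by omega)]
      rw [show i - sy = ((KY:Nat):Int) by omega]
    · rw [if_neg hc, ih i j hi hj (by omega) (fun t ht => hrows t (by omega))]
      by_cases hc2 : sy ≤ i ∧ i < sy + (KY:Nat) ∧ sx ≤ j ∧ j < sx + (KX:Nat)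
      · rw [if_pos hc2, if_pos (by omega)]
      · rw [if_neg hc2, if_neg (by omega)]

theorem pvSweep_shape (g : Int → Int → Int) (key L : List (List Int)) (sy sx kY kX : Int) :
    pvShape (pvSweep g key L sy sx kY kX) L := by
  unfold pvSweep
  exact pvShape_foldl _ _ (fun M y => pvShape_foldl _ _ (fun M x => pvShape_set2 _ _ _ _) M) L

theorem pvMatrix_ext {M N : List (List Int)} (h : pvShape M N)
    (he : ∀ i j : Nat, i < N.length → j < (N.getD i []).length →
      pvGet2 M (i : Int) (j : Int) = pvGet2 N (i : Int) (j : Int)) : M = N := by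
  have hlen := pvShape_length h
  refine List.ext_getElem hlen (fun i h1 h2 => ?_)
  have hrl : M[i].length = N[i].length := by
    have := pvShape_row h i
    rwa [List.getD_eq_getElem _ _ h1, List.getD_eq_getElem _ _ h2] at this
  refine List.ext_getElem hrl (fun j g1 g2 => ?_)
  have := he i j h2 (by rwa [List.getD_eq_getElem _ _ h2])
  unfold pvGet2 at this
  rw [Int.toNat_natCast, Int.toNat_natCast, List.getD_eq_getElem _ _ h1,
    List.getD_eq_getElem _ _ h2, List.getD_eq_getElem _ _ g1, List.getD_eq_getElem _ _ g2] at this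
  exact this

-- restoration: subtracting the key after adding it gives back the original lock
theorem pvRestore (key L : List (List Int)) (sy sx : Int) (K : Nat)
    (hsy : 0 ≤ sy) (hsx : 0 ≤ sx)
    (hL : sy.toNat + K ≤ L.length)
    (hrows : ∀ t, t < sy.toNat + K → sx.toNat + K ≤ (L.getD t []).length) :
    pvSweep (fun a b => a - b) key (pvSweep (fun a b => a + b) key L sy sx (K : Int) (K : Int))
      sy sx (K : Int) (K : Int) = L := by
  have hsh1 := pvSweep_shape (fun a b => a + b) key L sy sx (K : Int) (K : Int)
  have hsh2 := pvSweep_shape (fun a b => a - b) key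
    (pvSweep (fun a b => a + b) key L sy sx (K : Int) (K : Int)) sy sx (K : Int) (K : Int)
  refine pvMatrix_ext (pvShape_trans hsh2 hsh1) (fun i j h1 h2 => ?_)
  have hL1 : sy.toNat + K ≤ (pvSweep (fun a b => a + b) key L sy sx (K : Int) (K : Int)).length := by
    rw [pvShape_length hsh1]; exact hL
  have hrows1 : ∀ t, t < sy.toNat + K →
      sx.toNat + K ≤ ((pvSweep (fun a b => a + b) key L sy sx (K : Int) (K : Int)).getD t []).length := by
    intro t ht
    rw [pvShape_row hsh1]
    exact hrows t ht
  rw [pvSweep_get _ key _ sy sx K K (i : Int) (j : Int) hsy hsx (by positivity) (by positivity)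
    hL1 hrows1]
  rw [pvSweep_get _ key L sy sx K K (i : Int) (j : Int) hsy hsx (by positivity) (by positivity)
    hL hrows]
  split_ifs with hc
  · ring
  · rfl

theorem pvAny_congr {α : Type} {l : List α} {f g : α → Bool}
    (h : ∀ a ∈ l, f a = g a) : l.any f = l.any g := by
  induction l with
  | nil => rfl
  | cons a l ih => simp_all

-- one shift: A's add/check(/restore) equals B's pure window check, and a failing shift restores the lock
theorem pvAny_bang {α : Type} (l : List α) (f : α → Bool) :
    l.any (fun a => !(f a)) = !(l.all f) := by
  induction l with
  | nil => rfl
  | cons a l ih => simp [ih]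

theorem pvCheckRow_eq (L : List (List Int)) (k ld y x : Int) :
    pvCheckRow L k ld y x =
      (PySem.List.pyRange x ld 1).any (fun x' => pvGet2 L (k - 1 + y) (k - 1 + x') != 1) := by
  generalize hfuel : (ld - x).toNat = n
  induction n generalizing x with
  | zero =>
    rw [pvCheckRow, dif_neg (by omega), PySem.List.pyRange_one_eq_nil (by omega)]
    rfl
  | succ n ih =>
    rw [pvCheckRow, dif_pos (by omega), PySem.List.pyRange_one_cons (by omega), List.any_cons]
    by_cases hb : (pvGet2 L (k - 1 + y) (k - 1 + x) != 1) = true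
    · rw [if_pos hb, hb, Bool.true_or]
    · rw [if_neg hb, (Bool.not_eq_true _).mp hb, Bool.false_or, ih (x + 1) (by omega)]

theorem pvCheckFail_eq (L : List (List Int)) (k ld y : Int) :
    pvCheckFail L k ld y =
      (PySem.List.pyRange y ld 1).any (fun y' =>
        (PySem.List.pyRange 0 ld 1).any (fun x' => pvGet2 L (k - 1 + y') (k - 1 + x') != 1)) := by
  generalize hfuel : (ld - y).toNat = n
  induction n generalizing y with
  | zero =>
    rw [pvCheckFail, dif_neg (by omega), PySem.List.pyRange_one_eq_nil (by omega)]
    rfl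
  | succ n ih =>
    rw [pvCheckFail, dif_pos (by omega), PySem.List.pyRange_one_cons (by omega), List.any_cons,
      pvCheckRow_eq]
    by_cases hb : ((PySem.List.pyRange 0 ld 1).any
        (fun x' => pvGet2 L (k - 1 + y) (k - 1 + x') != 1)) = true
    · rw [if_pos hb, hb, Bool.true_or]
    · rw [if_neg hb, (Bool.not_eq_true _).mp hb, Bool.false_or, ih (y + 1) (by omega)]

theorem pvAltRow_eq (key lock : List (List Int)) (k base sy sx ld y x : Int) :
    pvAltRow key lock k base sy sx ld y x =
      (PySem.List.pyRange x ld 1).all (fun x' =>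
        pvGet2 lock (base + y) (base + x') +
          (if 0 ≤ base + y - sy ∧ base + y - sy < k ∧ 0 ≤ base + x' - sx ∧ base + x' - sx < k
           then pvGet2 key (base + y - sy) (base + x' - sx) else 0) == 1) := by
  generalize hfuel : (ld - x).toNat = n
  induction n generalizing x with
  | zero =>
    rw [pvAltRow, dif_neg (by omega), PySem.List.pyRange_one_eq_nil (by omega)]
    rfl
  | succ n ih =>
    rw [pvAltRow, dif_pos (by omega), PySem.List.pyRange_one_cons (by omega), List.all_cons,
      ih (x + 1) (by omega)]

theorem pvAltAll_eq (key lock : List (List Int)) (k base sy sx ld y : Int) :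
    pvAltAll key lock k base sy sx ld y =
      (PySem.List.pyRange y ld 1).all (fun y' =>
        (PySem.List.pyRange 0 ld 1).all (fun x' =>
          pvGet2 lock (base + y') (base + x') +
            (if 0 ≤ base + y' - sy ∧ base + y' - sy < k ∧ 0 ≤ base + x' - sx ∧ base + x' - sx < k
             then pvGet2 key (base + y' - sy) (base + x' - sx) else 0) == 1)) := by
  generalize hfuel : (ld - y).toNat = n
  induction n generalizing y with
  | zero =>
    rw [pvAltAll, dif_neg (by omega), PySem.List.pyRange_one_eq_nil (by omega)]
    rfl
  | succ n ih =>
    rw [pvAltAll, dif_pos (by omega), PySem.List.pyRange_one_cons (by omega), List.all_cons,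
      pvAltRow_eq, ih (y + 1) (by omega)]

theorem pvShift (key lock : List (List Int)) (lock_dim sy sx : Int)
    (K : Nat) (hK : K = (key.getD 0 []).length) (hK01 : 1 ≤ K ∨ lock_dim ≤ 0)
    (N : Nat) (hN : N = (lock.getD 0 []).length)
    (hNL : N ≤ lock.length) (hNr : ∀ r ∈ lock.take N, N ≤ r.length)
    (hld : (K : Int) - 1 + lock_dim ≤ (N : Int))
    (hsy : 0 ≤ sy) (hsy2 : sy + K ≤ N) (hsx : 0 ≤ sx) (hsx2 : sx + K ≤ N) :
    (pvAddMatrix key lock sy sx lock_dim).1 =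
      ((PySem.List.pyRange 0 lock_dim 1).all (fun y =>
        (PySem.List.pyRange 0 lock_dim 1).all (fun x =>
          pvGet2 lock ((K : Int) - 1 + y) ((K : Int) - 1 + x) +
            (if 0 ≤ (K : Int) - 1 + y - sy ∧ (K : Int) - 1 + y - sy < (K : Int) ∧
                0 ≤ (K : Int) - 1 + x - sx ∧ (K : Int) - 1 + x - sx < (K : Int)
             then pvGet2 key ((K : Int) - 1 + y - sy) ((K : Int) - 1 + x - sx) else 0) == 1)))
    ∧ ((pvAddMatrix key lock sy sx lock_dim).1 = false →
        (pvAddMatrix key lock sy sx lock_dim).2 = lock) := by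
  subst hK; subst hN
  have hL : sy.toNat + (key.getD 0 []).length ≤ lock.length := by omega
  have hrows : ∀ t, t < sy.toNat + (key.getD 0 []).length →
      sx.toNat + (key.getD 0 []).length ≤ (lock.getD t []).length := by
    intro t ht
    have htN : t < (lock.getD 0 []).length := by omega
    have htl : t < lock.length := by omega
    have hmem : lock.getD t [] ∈ lock.take (lock.getD 0 []).length := by
      rw [List.getD_eq_getElem _ _ htl]
      have he : lock[t] = (lock.take (lock.getD 0 []).length)[t]'(by
          rw [List.length_take]; omega) := (List.getElem_take).symm
      rw [he]
      exact List.getElem_mem _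
    have := hNr _ hmem
    omega
  have hAM : pvAddMatrix key lock sy sx lock_dim =
      (if pvCheckFail (pvSweep (fun a b => a + b) key lock sy sx
            ((key.getD 0 []).length : Int) ((key.getD 0 []).length : Int))
            ((key.getD 0 []).length : Int) lock_dim 0
       then (false, pvSweep (fun a b => a - b) key
              (pvSweep (fun a b => a + b) key lock sy sx
                ((key.getD 0 []).length : Int) ((key.getD 0 []).length : Int))
              sy sx ((key.getD 0 []).length : Int) ((key.getD 0 []).length : Int))
       else (true, pvSweep (fun a b => a + b) key lock sy sx
              ((key.getD 0 []).length : Int) ((key.getD 0 []).length : Int))) := rfl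
  have hval : ∀ y x : Int, 0 ≤ y → y < lock_dim → 0 ≤ x → x < lock_dim →
      pvGet2 (pvSweep (fun a b => a + b) key lock sy sx
          ((key.getD 0 []).length : Int) ((key.getD 0 []).length : Int))
          (((key.getD 0 []).length : Int) - 1 + y) (((key.getD 0 []).length : Int) - 1 + x)
        = pvGet2 lock (((key.getD 0 []).length : Int) - 1 + y)
            (((key.getD 0 []).length : Int) - 1 + x) +
          (if 0 ≤ ((key.getD 0 []).length : Int) - 1 + y - sy ∧
              ((key.getD 0 []).length : Int) - 1 + y - sy < ((key.getD 0 []).length : Int) ∧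
              0 ≤ ((key.getD 0 []).length : Int) - 1 + x - sx ∧
              ((key.getD 0 []).length : Int) - 1 + x - sx < ((key.getD 0 []).length : Int)
           then pvGet2 key (((key.getD 0 []).length : Int) - 1 + y - sy)
                  (((key.getD 0 []).length : Int) - 1 + x - sx) else 0) := by
    intro y x hy hyl hx hxl
    rcases hK01 with hK1 | hld0
    swap
    · exact absurd hyl (by omega)
    rw [pvSweep_get _ key lock sy sx (key.getD 0 []).length (key.getD 0 []).length _ _
      hsy hsx (by omega) (by omega) hL hrows]
    by_cases hc : sy ≤ ((key.getD 0 []).length : Int) - 1 + y ∧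
        ((key.getD 0 []).length : Int) - 1 + y < sy + ((key.getD 0 []).length : Int) ∧
        sx ≤ ((key.getD 0 []).length : Int) - 1 + x ∧
        ((key.getD 0 []).length : Int) - 1 + x < sx + ((key.getD 0 []).length : Int)
    · rw [if_pos hc, if_pos (by omega)]
    · rw [if_neg hc, if_neg (by omega), add_zero]
  have hany : pvCheckFail (pvSweep (fun a b => a + b) key lock sy sx
        ((key.getD 0 []).length : Int) ((key.getD 0 []).length : Int))
        ((key.getD 0 []).length : Int) lock_dim 0 =
      !((PySem.List.pyRange 0 lock_dim 1).all (fun y =>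
        (PySem.List.pyRange 0 lock_dim 1).all (fun x =>
          pvGet2 lock (((key.getD 0 []).length : Int) - 1 + y)
              (((key.getD 0 []).length : Int) - 1 + x) +
            (if 0 ≤ ((key.getD 0 []).length : Int) - 1 + y - sy ∧
                ((key.getD 0 []).length : Int) - 1 + y - sy < ((key.getD 0 []).length : Int) ∧
                0 ≤ ((key.getD 0 []).length : Int) - 1 + x - sx ∧
                ((key.getD 0 []).length : Int) - 1 + x - sx < ((key.getD 0 []).length : Int)
             then pvGet2 key (((key.getD 0 []).length : Int) - 1 + y - sy)
                    (((key.getD 0 []).length : Int) - 1 + x - sx) else 0) == 1))) := by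
    rw [pvCheckFail_eq]
    rw [← pvAny_bang]
    refine pvAny_congr (fun y hy => ?_)
    rw [← pvAny_bang]
    refine pvAny_congr (fun x hx => ?_)
    rw [PySem.List.mem_pyRange_one] at hy hx
    rw [hval y x hy.1 hy.2 hx.1 hx.2]
    rfl
  refine ⟨?_, ?_⟩
  · rw [hAM, hany]
    split_ifs with h
    · exact ((Bool.not_eq_true' _).mp h).symm
    · have h2 : ((PySem.List.pyRange 0 lock_dim 1).all fun y =>
          (PySem.List.pyRange 0 lock_dim 1).all fun x =>
            pvGet2 lock (((key.getD 0 []).length : Int) - 1 + y)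
                (((key.getD 0 []).length : Int) - 1 + x) +
              (if 0 ≤ ((key.getD 0 []).length : Int) - 1 + y - sy ∧
                  ((key.getD 0 []).length : Int) - 1 + y - sy < ((key.getD 0 []).length : Int) ∧
                  0 ≤ ((key.getD 0 []).length : Int) - 1 + x - sx ∧
                  ((key.getD 0 []).length : Int) - 1 + x - sx < ((key.getD 0 []).length : Int)
               then pvGet2 key (((key.getD 0 []).length : Int) - 1 + y - sy)
                      (((key.getD 0 []).length : Int) - 1 + x - sx) else 0) == 1) = true := by
        revert h
        cases ((PySem.List.pyRange 0 lock_dim 1).all fun y =>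
          (PySem.List.pyRange 0 lock_dim 1).all fun x =>
            pvGet2 lock (((key.getD 0 []).length : Int) - 1 + y)
                (((key.getD 0 []).length : Int) - 1 + x) +
              (if 0 ≤ ((key.getD 0 []).length : Int) - 1 + y - sy ∧
                  ((key.getD 0 []).length : Int) - 1 + y - sy < ((key.getD 0 []).length : Int) ∧
                  0 ≤ ((key.getD 0 []).length : Int) - 1 + x - sx ∧
                  ((key.getD 0 []).length : Int) - 1 + x - sx < ((key.getD 0 []).length : Int)
               then pvGet2 key (((key.getD 0 []).length : Int) - 1 + y - sy)
                      (((key.getD 0 []).length : Int) - 1 + x - sx) else 0) == 1) <;> simp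
      exact h2.symm
  · intro hfalse
    rw [hAM] at hfalse ⊢
    by_cases hc : pvCheckFail (pvSweep (fun a b => a + b) key lock sy sx
        ((key.getD 0 []).length : Int) ((key.getD 0 []).length : Int))
        ((key.getD 0 []).length : Int) lock_dim 0 = true
    · rw [if_pos hc]
      exact pvRestore key lock sy sx (key.getD 0 []).length hsy hsx hL hrows
    · rw [if_neg hc] at hfalse
      simp at hfalse

theorem pvGoA_eq (key lock : List (List Int)) (lock_dim : Int)
    (K : Nat) (hK : K = (key.getD 0 []).length) (hK01 : 1 ≤ K ∨ lock_dim ≤ 0)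
    (N : Nat) (hN : N = (lock.getD 0 []).length)
    (hNL : N ≤ lock.length) (hNr : ∀ r ∈ lock.take N, N ≤ r.length)
    (hld : (K : Int) - 1 + lock_dim ≤ (N : Int))
    (pairs : List (Int × Int))
    (hp : ∀ p ∈ pairs, 0 ≤ p.1 ∧ p.1 + K ≤ N ∧ 0 ≤ p.2 ∧ p.2 + K ≤ N) :
    pvGoA key lock_dim pairs lock =
      pairs.any (fun p =>
        (PySem.List.pyRange 0 lock_dim 1).all (fun y =>
          (PySem.List.pyRange 0 lock_dim 1).all (fun x =>
            pvGet2 lock ((K : Int) - 1 + y) ((K : Int) - 1 + x) +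
              (if 0 ≤ (K : Int) - 1 + y - p.1 ∧ (K : Int) - 1 + y - p.1 < (K : Int) ∧
                  0 ≤ (K : Int) - 1 + x - p.2 ∧ (K : Int) - 1 + x - p.2 < (K : Int)
               then pvGet2 key ((K : Int) - 1 + y - p.1) ((K : Int) - 1 + x - p.2) else 0) == 1))) := by
  induction pairs with
  | nil => rfl
  | cons p rest ih =>
    obtain ⟨sy, sx⟩ := p
    obtain ⟨h1, h2, h3, h4⟩ := hp (sy, sx) (List.mem_cons_self)
    have hs := pvShift key lock lock_dim sy sx K hK hK01 N hN hNL hNr hld h1 h2 h3 h4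
    rw [List.any_cons]
    show (if (pvAddMatrix key lock sy sx lock_dim).1 then true
          else pvGoA key lock_dim rest (pvAddMatrix key lock sy sx lock_dim).2) = _
    cases hr : (pvAddMatrix key lock sy sx lock_dim).1 with
    | true =>
      rw [hs.1] at hr
      simp only [if_true, hr, Bool.true_or]
    | false =>
      have hresto := hs.2 hr
      rw [hs.1] at hr
      simp only [Bool.false_eq_true, if_false, hr, Bool.false_or, hresto]
      exact ih (fun q hq => hp q (List.mem_cons_of_mem _ hq))

-- ===== VERDICT (by name: the statement is the Claim_ definition above) =====
theorem is_solution_spec : Claim_equal_is_solution := by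
  intro key lock ld hdom hpre
  unfold Spec_is_solution
  obtain ⟨hk0, hl0, hKlen, hKrows, hNlen, hNrows, hK01, hwin⟩ := hpre
  have hA : is_solution key lock ld = pvGoA key ld
      ((PySem.List.pyRange 0 (((lock.getD 0 []).length : Int) -
          ((key.getD 0 []).length : Int) + 1) 1).flatMap fun sy =>
        (PySem.List.pyRange 0 (((lock.getD 0 []).length : Int) -
          ((key.getD 0 []).length : Int) + 1) 1).map fun sx => (sy, sx)) lock := rfl
  have hB : is_solution_alt key lock ld =
      (PySem.List.pyRange 0 (((lock.getD 0 []).length : Int) -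
          ((key.getD 0 []).length : Int) + 1) 1).any (fun sy =>
        (PySem.List.pyRange 0 (((lock.getD 0 []).length : Int) -
          ((key.getD 0 []).length : Int) + 1) 1).any (fun sx =>
          pvAltAll key lock ((key.getD 0 []).length : Int)
            (((key.getD 0 []).length : Int) - 1) sy sx ld 0)) := rfl
  by_cases hKN : (key.getD 0 []).length ≤ (lock.getD 0 []).length
  · have hp : ∀ p ∈ ((PySem.List.pyRange 0 (((lock.getD 0 []).length : Int) -
          ((key.getD 0 []).length : Int) + 1) 1).flatMap fun sy =>
        (PySem.List.pyRange 0 (((lock.getD 0 []).length : Int) -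
          ((key.getD 0 []).length : Int) + 1) 1).map fun sx => (sy, sx)),
        0 ≤ p.1 ∧ p.1 + (key.getD 0 []).length ≤ (lock.getD 0 []).length ∧
        0 ≤ p.2 ∧ p.2 + (key.getD 0 []).length ≤ (lock.getD 0 []).length := by
      intro p hpm
      rw [List.mem_flatMap] at hpm
      obtain ⟨sy, hsy, hpm⟩ := hpm
      rw [List.mem_map] at hpm
      obtain ⟨sx, hsx, rfl⟩ := hpm
      rw [PySem.List.mem_pyRange_one] at hsy hsx
      exact ⟨hsy.1, by omega, hsx.1, by omega⟩
    rw [hA, pvGoA_eq key lock ld (key.getD 0 []).length rfl hK01 (lock.getD 0 []).length rfl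
      hNlen hNrows (hwin hKN) _ hp, hB, List.any_flatMap]
    refine pvAny_congr (fun sy _ => ?_)
    rw [List.any_map]
    refine pvAny_congr (fun sx _ => ?_)
    rw [pvAltAll_eq]
    rfl
  · have hnil : PySem.List.pyRange 0 (((lock.getD 0 []).length : Int) -
        ((key.getD 0 []).length : Int) + 1) 1 = [] :=
      PySem.List.pyRange_one_eq_nil (by omega)
    rw [hA, hB, hnil]
    rfl
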